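-- pv_equiv track=rewrite | github.com/hoangph1302/Crypto_DES | lab2.py | KeyShedule
-- ===== SOURCE A (Python) =====
-- def  Permutation(input,tablePermutation):
-- 	output=""
-- 	for x in range(0,len(tablePermutation)):
-- 		output=output+input[tablePermutation[x]-1]
-- 	return output
--
-- tablePermutation_PC1=[57, 49, 41, 33, 25, 17, 9,
--                       1, 58, 50, 42, 34, 26, 18,
--                       10, 2, 59, 51, 43, 35, 27,
--                       19, 11, 3, 60, 52, 44, 36,
--                       63, 55, 47, 39, 31, 23, 15,
--                       7, 62, 54, 46, 38, 30, 22,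
--                       14, 6, 61, 53, 45, 37, 29,
--                       21, 13, 5, 28, 20, 12, 4 ]
--
-- tablePermutation_PC2=[14, 17, 11, 24, 1, 5,
--                       3, 28, 15, 6, 21, 10,
--                       23, 19, 12, 4, 26, 8,
--                       16, 7, 27, 20, 13, 2,
--                       41, 52, 31, 37, 47, 55,
--                       30, 40, 51, 45, 33, 48,
--                       44, 49, 39, 56, 34, 53,
--                       46, 42, 50, 36, 29, 32 ]
--
-- def ChangeHexToBinary(hex):
-- 	binary=""
-- 	binary=format(int(hex, 16), "064b")
-- 	return binary
--
-- def LeftShift1(input):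
-- 	output=""
-- 	for x in range(0,27):
-- 		output=output+input[x+1]
-- 	output=output+input[0]
-- 	return output
--
-- def LeftShift2(input):
-- 	output=""
-- 	for x in range(0,26):
-- 		output=output+input[x+2]
-- 	output=output+input[0]
-- 	output=output+input[1]
-- 	return output
--
-- def KeyShedule(key):
-- 	keyBin=Permutation(ChangeHexToBinary(key),tablePermutation_PC1) #56 bits of the key are selected from the initial 64 by Permuted Choice 1 (PC-1)
-- 	arrayKey=[]
-- 	C=keyBin[0:28] #The 56 bits are then divided into two 28-bit halves C and D
-- 	D=keyBin[28:56]
--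
-- 	for x in range(1,17):
-- 		if (x==1 or x==2 or x==9 or x==16):
-- 			C=LeftShift1(C)
-- 			D=LeftShift1(D)
-- 			keyLeftShift=C+D
-- 			arrayKey.append(Permutation(keyLeftShift,tablePermutation_PC2)) #48 subkey bits are selected by Permuted Choice 2 (PC-2)
-- 		else:
-- 			C=LeftShift2(C)
-- 			D=LeftShift2(D)
-- 			keyLeftShift=C+D
-- 			arrayKey.append(Permutation(keyLeftShift,tablePermutation_PC2)) #48 subkey bits are selected by Permuted Choice 2 (PC-2)
-- 	return arrayKey
-- ===== SOURCE B (Python) =====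
-- # B: table-driven key schedule — a shift-schedule list plus a single slicing
-- # rotation replaces A's two char-by-char LeftShift loops and its round-number branch.
-- def Permutation(input, tablePermutation):
-- 	output = ""
-- 	for x in range(0, len(tablePermutation)):
-- 		output = output + input[tablePermutation[x] - 1]
-- 	return output
--
-- tablePermutation_PC1 = [57, 49, 41, 33, 25, 17, 9,
--                         1, 58, 50, 42, 34, 26, 18,
--                         10, 2, 59, 51, 43, 35, 27,
--                         19, 11, 3, 60, 52, 44, 36,
--                         63, 55, 47, 39, 31, 23, 15,
--                         7, 62, 54, 46, 38, 30, 22,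
--                         14, 6, 61, 53, 45, 37, 29,
--                         21, 13, 5, 28, 20, 12, 4]
--
-- tablePermutation_PC2 = [14, 17, 11, 24, 1, 5,
--                         3, 28, 15, 6, 21, 10,
--                         23, 19, 12, 4, 26, 8,
--                         16, 7, 27, 20, 13, 2,
--                         41, 52, 31, 37, 47, 55,
--                         30, 40, 51, 45, 33, 48,
--                         44, 49, 39, 56, 34, 53,
--                         46, 42, 50, 36, 29, 32]
--
-- def ChangeHexToBinary(hex):
-- 	return format(int(hex, 16), "064b")
--
-- def KeyShedule(key):
-- 	keyBin = Permutation(ChangeHexToBinary(key), tablePermutation_PC1)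
-- 	C, D = keyBin[0:28], keyBin[28:56]
-- 	shifts = [1, 1, 2, 2, 2, 2, 2, 2, 1, 2, 2, 2, 2, 2, 2, 1]
-- 	rot = lambda s, n: s[n:] + s[:n]
-- 	subkeys = []
-- 	for n in shifts:
-- 		C, D = rot(C, n), rot(D, n)
-- 		subkeys.append(Permutation(C + D, tablePermutation_PC2))
-- 	return subkeys
-- ===== Notes on version B (the rewrite author's own statement) =====
-- stated objective: idiomatic
-- what changed: Replaces A's two char-by-char LeftShift loops and the x in {1,2,9,16} round-number branch with a DES shift-schedule table and a single slicing rotation rot(s,n)=s[n:]+s[:n].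
import Mathlib
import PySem

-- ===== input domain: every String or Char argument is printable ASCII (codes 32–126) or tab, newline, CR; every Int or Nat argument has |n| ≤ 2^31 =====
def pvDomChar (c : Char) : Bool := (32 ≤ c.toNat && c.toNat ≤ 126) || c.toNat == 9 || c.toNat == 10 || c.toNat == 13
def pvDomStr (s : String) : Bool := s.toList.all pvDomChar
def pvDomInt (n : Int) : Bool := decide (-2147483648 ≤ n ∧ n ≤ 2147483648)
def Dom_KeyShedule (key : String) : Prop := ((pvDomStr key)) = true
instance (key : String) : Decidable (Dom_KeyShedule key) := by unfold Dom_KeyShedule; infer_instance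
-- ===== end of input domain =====

-- B replaces A's two char-by-char LeftShift loops and the round-number branch by a
-- shift-schedule table and a single slicing rotation (objective: more idiomatic; not faster).
-- ===== PORT A =====
-- shared helpers (both Pythons contain the same Permutation / tables / ChangeHexToBinary)

-- Permutation: for x in range(0,len(table)): output += input[table[x]-1]
def pvPerm (input : List Char) (table : List Int) : List Char :=
  (PySem.List.pyRange 0 (table.length : Int) 1).foldl
    (fun out x => out ++ [PySem.List.pyGetD input (PySem.List.pyGetD table x 0 - 1) '?']) []

def pvPC1 : List Int := [57, 49, 41, 33, 25, 17, 9,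
                         1, 58, 50, 42, 34, 26, 18,
                         10, 2, 59, 51, 43, 35, 27,
                         19, 11, 3, 60, 52, 44, 36,
                         63, 55, 47, 39, 31, 23, 15,
                         7, 62, 54, 46, 38, 30, 22,
                         14, 6, 61, 53, 45, 37, 29,
                         21, 13, 5, 28, 20, 12, 4]

def pvPC2 : List Int := [14, 17, 11, 24, 1, 5,
                         3, 28, 15, 6, 21, 10,
                         23, 19, 12, 4, 26, 8,
                         16, 7, 27, 20, 13, 2,
                         41, 52, 31, 37, 47, 55,
                         30, 40, 51, 45, 33, 48,
                         44, 49, 39, 56, 34, 53,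
                         46, 42, 50, 36, 29, 32]

-- format(int(hex,16), "064b"): sign, then zero padding to total width 64, then binary digits
-- (hand-written, exact: PySem.Int.toBinChars is format(n,'b'); the padding is the '064' width rule)
def pvFmt064b (n : Int) : List Char :=
  if n < 0 then
    let digs := PySem.Int.toBinChars (-n)
    '-' :: (List.replicate (63 - digs.length) '0' ++ digs)
  else
    let digs := PySem.Int.toBinChars n
    List.replicate (64 - digs.length) '0' ++ digs

-- LeftShift1: for x in range(0,27): output += input[x+1]; output += input[0]
def pvLS1 (input : List Char) : List Char :=
  ((PySem.List.pyRange 0 27 1).foldl (fun out x => out ++ [PySem.List.pyGetD input (x + 1) '?']) [])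
    ++ [PySem.List.pyGetD input 0 '?']

-- LeftShift2: for x in range(0,26): output += input[x+2]; output += input[0]; output += input[1]
def pvLS2 (input : List Char) : List Char :=
  ((PySem.List.pyRange 0 26 1).foldl (fun out x => out ++ [PySem.List.pyGetD input (x + 2) '?']) [])
    ++ [PySem.List.pyGetD input 0 '?'] ++ [PySem.List.pyGetD input 1 '?']

def pvStepA (s : List Char × List Char × List (List Char)) (x : Int) :
    List Char × List Char × List (List Char) :=
  if x = 1 ∨ x = 2 ∨ x = 9 ∨ x = 16 then
    let C := pvLS1 s.1
    let D := pvLS1 s.2.1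
    (C, D, s.2.2 ++ [pvPerm (C ++ D) pvPC2])
  else
    let C := pvLS2 s.1
    let D := pvLS2 s.2.1
    (C, D, s.2.2 ++ [pvPerm (C ++ D) pvPC2])

def KeyShedule (key : String) : List String :=
  match PySem.Int.ofStrBase? key 16 with
  | none => []   -- int(key,16) raises ValueError: excluded by Pre_KeyShedule
  | some n =>
    let keyBin := pvPerm (pvFmt064b n) pvPC1
    let C := PySem.List.slice keyBin (some 0) (some 28)
    let D := PySem.List.slice keyBin (some 28) (some 56)
    let st := (PySem.List.pyRange 1 17 1).foldl pvStepA (C, D, [])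
    st.2.2.map String.ofList

-- ===== PORT B =====
-- rot = lambda s, n: s[n:] + s[:n]
def pvRot (s : List Char) (n : Int) : List Char :=
  PySem.List.slice s (some n) none ++ PySem.List.slice s none (some n)

def pvShifts : List Int := [1, 1, 2, 2, 2, 2, 2, 2, 1, 2, 2, 2, 2, 2, 2, 1]

def pvStepB (s : List Char × List Char × List (List Char)) (n : Int) :
    List Char × List Char × List (List Char) :=
  let C := pvRot s.1 n
  let D := pvRot s.2.1 n
  (C, D, s.2.2 ++ [pvPerm (C ++ D) pvPC2])

def KeyShedule_alt (key : String) : List String :=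
  match PySem.Int.ofStrBase? key 16 with
  | none => []
  | some n =>
    let keyBin := pvPerm (pvFmt064b n) pvPC1
    let st := pvShifts.foldl pvStepB
      (PySem.List.slice keyBin (some 0) (some 28), PySem.List.slice keyBin (some 28) (some 56), [])
    st.2.2.map String.ofList

-- ===== PRECONDITION & SPEC =====
-- A raises ValueError exactly when int(key,16) does; Pre_ admits exactly the keys that parse as base-16 integers.
def Pre_KeyShedule (key : String) : Prop := (PySem.Int.ofStrBase? key 16).isSome = true
instance (key : String) : Decidable (Pre_KeyShedule key) := by unfold Pre_KeyShedule; infer_instance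
def pvWitness_KeyShedule : String := "0123456789abcdef"

def Spec_KeyShedule (key : String) (out : List String) : Prop := out = KeyShedule_alt key
instance (key : String) (out : List String) : Decidable (Spec_KeyShedule key out) := by unfold Spec_KeyShedule; infer_instance

-- ===== CLAIM (what is proved, stated in full; the proofs are below) =====
def Claim_equal_KeyShedule : Prop := ∀ (key : String), Dom_KeyShedule key → Pre_KeyShedule key → Spec_KeyShedule key (KeyShedule key)

-- ===== LEMMAS AND PROOFS =====

theorem pvPerm_eq_map (input : List Char) (table : List Int) :
    pvPerm input table = table.map (fun t => PySem.List.pyGetD input (t - 1) '?') := by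
  unfold pvPerm
  rw [PySem.List.foldl_pyRange_zero_pyGetD' table 0
      (fun out t => out ++ [PySem.List.pyGetD input (t - 1) '?']) []]
  simpa using PySem.List.foldl_append_singleton_eq_map (fun t => PySem.List.pyGetD input (t - 1) '?') table []


theorem pvMapShift (C : List Char) (m k : Nat) (h : C.length = m + k) :
    (PySem.List.pyRange 0 (m : Int) 1).map (fun x => PySem.List.pyGetD C (x + (k : Int)) '?')
      = C.drop k := by
  apply List.ext_getElem
  · simp [PySem.List.length_pyRange_one, h]
  · intro i h1 h2
    simp only [List.getElem_map, PySem.List.getElem_pyRange_one]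
    have hcast : (0 : Int) + (i : Int) + (k : Int) = ((i + k : Nat) : Int) := by push_cast; ring
    rw [hcast, PySem.List.pyGetD_natCast]
    have hlt : i + k < C.length := by
      simp [PySem.List.length_pyRange_one] at h1; omega
    rw [List.getD_eq_getElem C '?' hlt, List.getElem_drop]
    congr 1
    omega

theorem pvRot_nat (C : List Char) (k : Nat) :
    pvRot C (k : Int) = C.drop k ++ C.take k := by
  unfold pvRot
  rw [PySem.List.slice_from_natCast, PySem.List.slice_to_natCast]

theorem pvLS1_eq_rot (C : List Char) (h : C.length = 28) : pvLS1 C = pvRot C 1 := by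
  have hr := pvRot_nat C 1
  push_cast at hr
  have hm := pvMapShift C 27 1 (by omega)
  push_cast at hm
  unfold pvLS1
  rw [hr, PySem.List.foldl_append_singleton_eq_map (fun x => PySem.List.pyGetD C (x + 1) '?'),
      List.nil_append, hm]
  congr 1
  match C, h with
  | c :: t, _ => simp [PySem.List.pyGetD_zero_cons]

theorem pvLS2_eq_rot (C : List Char) (h : C.length = 28) : pvLS2 C = pvRot C 2 := by
  have hr := pvRot_nat C 2
  push_cast at hr
  have hm := pvMapShift C 26 2 (by omega)
  push_cast at hm
  unfold pvLS2
  rw [hr, PySem.List.foldl_append_singleton_eq_map (fun x => PySem.List.pyGetD C (x + 2) '?'),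
      List.nil_append, hm, List.append_assoc]
  congr 1
  match C, h with
  | a :: b :: t, _ =>
    simp [PySem.List.pyGetD_ofNat']

theorem pvRot_length (C : List Char) (k : Nat) :
    (pvRot C (k : Int)).length = C.length := by
  rw [pvRot_nat]
  simp [List.length_append]
  omega

theorem pvLoop_eq (xs : List Int) (C D : List Char) (acc : List (List Char))
    (hC : C.length = 28) (hD : D.length = 28) :
    xs.foldl pvStepA (C, D, acc)
      = (xs.map (fun x => if x = 1 ∨ x = 2 ∨ x = 9 ∨ x = 16 then (1 : Int) else 2)).foldl
          pvStepB (C, D, acc) := by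
  induction xs generalizing C D acc with
  | nil => rfl
  | cons x xs ih =>
    simp only [List.map_cons, List.foldl_cons]
    by_cases hx : x = 1 ∨ x = 2 ∨ x = 9 ∨ x = 16
    · simp only [pvStepA, pvStepB, hx, if_pos,
        pvLS1_eq_rot C hC, pvLS1_eq_rot D hD]
      have h1 := pvRot_length C 1; have h2 := pvRot_length D 1
      push_cast at h1 h2
      exact ih _ _ _ (by rw [h1, hC]) (by rw [h2, hD])
    · simp only [pvStepA, pvStepB, hx, if_neg, not_false_iff,
        pvLS2_eq_rot C hC, pvLS2_eq_rot D hD]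
      have h1 := pvRot_length C 2; have h2 := pvRot_length D 2
      push_cast at h1 h2
      exact ih _ _ _ (by rw [h1, hC]) (by rw [h2, hD])

theorem pvKeyBin_length (n : Int) : (pvPerm (pvFmt064b n) pvPC1).length = 56 := by
  rw [pvPerm_eq_map]
  simp [pvPC1]

theorem KeyShedule_spec : Claim_equal_KeyShedule := by
  intro key _ hpre
  unfold Spec_KeyShedule KeyShedule KeyShedule_alt
  obtain ⟨n, hn⟩ := Option.isSome_iff_exists.mp hpre
  simp only [hn]
  have hbin := pvKeyBin_length n
  set keyBin := pvPerm (pvFmt064b n) pvPC1 with hkb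
  have hC : (PySem.List.slice keyBin (some 0) (some 28)).length = 28 := by
    rw [PySem.List.slice_toNat keyBin (by norm_num) (by norm_num)]
    simp [hbin]
  have hD : (PySem.List.slice keyBin (some 28) (some 56)).length = 28 := by
    rw [PySem.List.slice_toNat keyBin (by norm_num) (by norm_num)]
    simp [hbin]
  rw [pvLoop_eq _ _ _ _ hC hD]
  rfl
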